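-- pv_equiv track=rewrite | github.com/richardjharris/richardjharris.github.io | mdx_furigana.py | make_pitch_html
-- ===== SOURCE A (Python) =====
-- def make_pitch_html(kanji, pitch):
--     prev = None
--     output = ''
--
--     def _span(cls):
--         return '<span class="' + cls + '">'
--     _close = '</span>'
--
--     for mora, hl in zip(kanji, pitch.lower()):
--         if prev != hl:
--             if prev:
--                 output += _close + _span('tone-' + hl + '-change')
--             else:
--                 output += _span('tone-' + hl)
--         output += mora
--         prev = hl
--
--     if prev:
--         output += _close
--         output = _span('tone-container') + output + _close
--
--     return output
-- ===== SOURCE B (Python) =====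
-- def make_pitch_html(kanji, pitch):
--     pairs = list(zip(kanji, pitch.lower()))
--     if not pairs:
--         return ''
--     parts = ['<span class="tone-container">']
--     n = len(pairs)
--     i = 0
--     first = True
--     while i < n:
--         hl = pairs[i][1]
--         # find the end of the maximal run of pitch hl
--         j = i + 1
--         while j < n and pairs[j][1] == hl:
--             j += 1
--         pre = '' if first else '</span>'
--         cls = 'tone-' + hl + ('' if first else '-change')
--         parts.append(pre + '<span class="' + cls + '">' + ''.join(m for m, _ in pairs[i:j]))
--         first = False
--         i = j
--     parts.append('</span></span>')
--     return ''.join(parts)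
-- ===== Notes on version B (the rewrite author's own statement) =====
-- stated objective: alternative
-- what changed: Replaces A's per-character state machine (tracking the previous pitch and emitting HTML inline) with a run-oriented decomposition that recursively peels off one maximal same-pitch run at a time and renders each run as a whole.
import Mathlib
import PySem

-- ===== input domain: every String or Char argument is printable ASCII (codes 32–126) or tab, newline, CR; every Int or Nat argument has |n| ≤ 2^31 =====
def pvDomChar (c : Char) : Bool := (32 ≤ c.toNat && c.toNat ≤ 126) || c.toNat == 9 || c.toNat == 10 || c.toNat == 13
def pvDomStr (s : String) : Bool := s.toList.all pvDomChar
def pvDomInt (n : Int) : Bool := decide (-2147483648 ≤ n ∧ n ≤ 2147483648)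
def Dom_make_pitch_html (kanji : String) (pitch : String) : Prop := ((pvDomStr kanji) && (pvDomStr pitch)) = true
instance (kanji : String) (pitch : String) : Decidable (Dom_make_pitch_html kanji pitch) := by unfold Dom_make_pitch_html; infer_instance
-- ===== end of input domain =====

-- B replaces A's per-character prev-tracking state machine with a run-oriented
-- decomposition (peel off one same-pitch run at a time and render it); objective: alternative.

-- ===== PORT A =====
-- _span(cls) helper of A
def pvSpan (cls : String) : String := "<span class=\"" ++ cls ++ "\">"

-- one iteration of A's for-loop over (mora, hl); state = (prev, output)
def pvAStep (st : Option Char × String) (mh : Char × Char) : Option Char × String :=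
  let (prev, output) := st
  let (mora, hl) := mh
  let output :=
    if prev ≠ some hl then
      match prev with
      | some _ => output ++ "</span>" ++ pvSpan ("tone-" ++ String.singleton hl ++ "-change")
      | none => output ++ pvSpan ("tone-" ++ String.singleton hl)
    else output
  (some hl, output ++ String.singleton mora)

def make_pitch_html (kanji : String) (pitch : String) : String :=
  let st := (kanji.toList.zip (PySem.Str.lower pitch).toList).foldl pvAStep (none, "")
  -- Python `if prev:` — prev is None or a (nonempty, hence truthy) 1-char string
  match st.1 with
  | some _ => pvSpan "tone-container" ++ (st.2 ++ "</span>") ++ "</span>"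
  | none => st.2

-- ===== PORT B =====
-- _split_run of Source B: peel the leading morae whose pitch equals hl
def pvSplitRun (hl : Char) : List (Char × Char) → String × List (Char × Char)
  | [] => ("", [])
  | (m, h) :: rest =>
    if h = hl then
      let s := pvSplitRun hl rest
      (String.singleton m ++ s.1, s.2)
    else ("", (m, h) :: rest)

theorem pvSplitRun_len (hl : Char) (l : List (Char × Char)) :
    (pvSplitRun hl l).2.length ≤ l.length := by
  induction l with
  | nil => simp [pvSplitRun]
  | cons p r ih =>
    obtain ⟨m, h⟩ := p
    simp only [pvSplitRun]
    split
    · exact Nat.le_succ_of_le ih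
    · simp

-- _render of Source B
def pvRender : List (Char × Char) → Bool → String
  | [], _ => ""
  | (mora, hl) :: rest0, first =>
    let s := pvSplitRun hl rest0
    let cls := "tone-" ++ String.singleton hl ++ (if first then "" else "-change")
    let pre := if first then "" else "</span>"
    pre ++ "<span class=\"" ++ cls ++ "\">" ++ String.singleton mora ++ s.1 ++ pvRender s.2 false
  termination_by l => l.length
  decreasing_by
    have := pvSplitRun_len hl rest0
    simp_all

def make_pitch_html_alt (kanji : String) (pitch : String) : String :=
  let pairs := kanji.toList.zip (PySem.Str.lower pitch).toList
  match pairs with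
  | [] => ""
  | _ => "<span class=\"tone-container\">" ++ pvRender pairs true ++ "</span></span>"

-- ===== PRECONDITION & SPEC =====
def Spec_make_pitch_html (kanji : String) (pitch : String) (out : String) : Prop := out = make_pitch_html_alt kanji pitch
instance (kanji : String) (pitch : String) (out : String) : Decidable (Spec_make_pitch_html kanji pitch out) := by unfold Spec_make_pitch_html; infer_instance

-- ===== CLAIM (what is proved, stated in full; the proofs are below) =====
def Claim_equal_make_pitch_html : Prop := ∀ (kanji : String) (pitch : String), Dom_make_pitch_html kanji pitch → Spec_make_pitch_html kanji pitch (make_pitch_html kanji pitch)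

-- ===== LEMMAS AND PROOFS =====

-- the string A's loop appends while consuming l, given previous pitch `prev`
def pvEmit : Option Char → List (Char × Char) → String
  | _, [] => ""
  | prev, (mora, hl) :: r =>
    (if prev ≠ some hl then
      match prev with
      | some _ => "</span>" ++ pvSpan ("tone-" ++ String.singleton hl ++ "-change")
      | none => pvSpan ("tone-" ++ String.singleton hl)
     else "") ++ String.singleton mora ++ pvEmit (some hl) r

-- A's final `prev` after consuming l
def pvLastP : Option Char → List (Char × Char) → Option Char
  | prev, [] => prev
  | _, (_, hl) :: r => pvLastP (some hl) r

theorem pvFoldl_eq (l : List (Char × Char)) :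
    ∀ (prev : Option Char) (out : String),
      l.foldl pvAStep (prev, out) = (pvLastP prev l, out ++ pvEmit prev l) := by
  induction l with
  | nil => intro prev out; simp [pvLastP, pvEmit]
  | cons p r ih =>
    intro prev out
    obtain ⟨mora, hl⟩ := p
    simp only [List.foldl_cons, pvAStep, pvLastP, pvEmit, ih]
    by_cases hp : prev = some hl
    · subst hp; simp [String.append_assoc, String.singleton]
    · cases prev with
      | none => simp [hp, String.append_assoc, String.singleton]
      | some c => simp [hp, String.append_assoc, String.singleton]

theorem pvLastP_ne_none (l : List (Char × Char)) :
    ∀ (c : Char), pvLastP (some c) l ≠ none := by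
  induction l with
  | nil => intro c; simp [pvLastP]
  | cons p r ih => intro c; obtain ⟨m, h⟩ := p; simp only [pvLastP]; exact ih h

theorem pvEmit_some_eq (l : List (Char × Char)) :
    ∀ (h : Char), pvEmit (some h) l = (pvSplitRun h l).1 ++ pvRender (pvSplitRun h l).2 false := by
  induction l with
  | nil =>
    intro h
    rw [pvRender.eq_def]
    simp [pvEmit, pvSplitRun]
  | cons p r ih =>
    intro h
    obtain ⟨m, h'⟩ := p
    by_cases hh : h' = h
    · subst hh
      simp only [pvEmit, pvSplitRun, if_true]
      simp [ih h', String.append_assoc, String.singleton]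
    · have hne : some h ≠ some h' := by simp [Ne.symm hh]
      simp only [pvEmit, pvSplitRun, if_neg hh]
      rw [pvRender.eq_def]
      simp [hne, ih h', pvSpan, String.append_assoc, String.singleton]
      rw [show ("</span><span class=\"" : String) = "</span>" ++ "<span class=\"" from rfl,
        String.append_assoc]

theorem pvEmit_none_eq_render (l : List (Char × Char)) (hl : l ≠ []) :
    pvEmit none l = pvRender l true := by
  cases l with
  | nil => exact absurd rfl hl
  | cons p r =>
    obtain ⟨m, h⟩ := p
    rw [pvRender.eq_def]
    simp [pvEmit, pvEmit_some_eq, pvSpan, String.append_assoc, String.singleton]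

-- ===== VERDICT (by name: the statement is the Claim_ definition above) =====
theorem make_pitch_html_spec : Claim_equal_make_pitch_html := by
  intro kanji pitch _
  unfold Spec_make_pitch_html make_pitch_html make_pitch_html_alt
  cases hz : kanji.toList.zip (PySem.Str.lower pitch).toList with
  | nil => simp [List.foldl]
  | cons p r =>
    obtain ⟨m, h⟩ := p
    simp only [pvFoldl_eq, pvLastP]
    have hrender : pvEmit none ((m, h) :: r) = pvRender ((m, h) :: r) true :=
      pvEmit_none_eq_render _ (by simp)
    cases hL : pvLastP (some h) r with
    | none => exact absurd hL (pvLastP_ne_none r h)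
    | some d => simp [hrender, pvSpan, String.append_assoc]
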